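-- pv_equiv track=rewrite | github.com/MahatoOm/LeetCode | find-k-th-smallest-pair-distance/find-k-th-smallest-pair-distance.py | count_low_distance_pairs
-- ===== SOURCE A (Python) =====
-- def count_low_distance_pairs(nums, max_distance):
--
--     arr_size = len(nums)
--     left = 0
--     count = 0
--     for right in range(arr_size):
--
--         while nums[right] - nums[left] > max_distance:
--             left +=1
--
--         count += right - left
--     return count
-- ===== SOURCE B (Python) =====
-- def count_low_distance_pairs(nums, max_distance):
--     # Per-element hand-written binary search instead of a persistent two-pointer window.
--     count = 0
--     for right in range(len(nums)):
--         target = nums[right] - max_distance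
--         lo, hi = 0, right
--         while lo < hi:
--             mid = (lo + hi) // 2
--             if nums[mid] < target:
--                 lo = mid + 1
--             else:
--                 hi = mid
--         count += right - lo
--     return count
-- ===== Notes on version B (the rewrite author's own statement) =====
-- stated objective: alternative
-- what changed: Replaces the persistent two-pointer window (a left pointer carried across iterations) with an independent hand-written bisect_left binary search per element; no cross-iteration state besides the count.
-- outside the precondition, e.g. on count_low_distance_pairs([0, 10, 0], 1): A returns 1, B returns 2; on count_low_distance_pairs([1, 1], -1): A raises IndexError, B returns 0
import Mathlib
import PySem

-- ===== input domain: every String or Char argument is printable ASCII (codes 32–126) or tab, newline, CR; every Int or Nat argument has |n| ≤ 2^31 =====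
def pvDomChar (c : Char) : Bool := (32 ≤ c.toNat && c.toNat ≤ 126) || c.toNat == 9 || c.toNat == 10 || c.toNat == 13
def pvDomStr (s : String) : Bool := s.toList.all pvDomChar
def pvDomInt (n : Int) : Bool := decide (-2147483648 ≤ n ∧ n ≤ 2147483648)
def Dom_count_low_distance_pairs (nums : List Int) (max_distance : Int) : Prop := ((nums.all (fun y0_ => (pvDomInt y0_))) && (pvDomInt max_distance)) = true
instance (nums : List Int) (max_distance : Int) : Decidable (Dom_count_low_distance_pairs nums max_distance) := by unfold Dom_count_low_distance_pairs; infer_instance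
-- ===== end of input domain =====

-- B replaces A's persistent two-pointer window by an independent hand-written
-- bisect_left binary search per element (alternative decomposition, not claimed faster).

-- ===== PORT A =====
-- the inner 'while nums[right] - nums[left] > max_distance: left += 1';
-- List.getD is exact here since Pre_ keeps every index in range (left ≤ right < len)
def pvAdvA (nums : List Int) (max_distance : Int) (r : Nat) (left : Nat) : Nat :=
  if h : left < nums.length then
    if nums.getD r 0 - nums.getD left 0 > max_distance then
      pvAdvA nums max_distance r (left + 1)
    else left
  else left
termination_by nums.length - left

def count_low_distance_pairs (nums : List Int) (max_distance : Int) : Int :=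
  let arr_size := nums.length
  ((List.range arr_size).foldl
    (fun (st : Nat × Int) right =>
      let left := pvAdvA nums max_distance right st.1
      (left, st.2 + ((right : Int) - (left : Int))))
    (0, 0)).2

-- ===== PORT B =====
-- the hand-written 'while lo < hi' bisect_left loop of Source B
def pvBis (nums : List Int) (target : Int) (lo hi : Nat) : Nat :=
  if h : lo < hi then
    let mid := (lo + hi) / 2
    if nums.getD mid 0 < target then pvBis nums target (mid + 1) hi
    else pvBis nums target lo mid
  else lo
termination_by hi - lo
decreasing_by all_goals omega

def count_low_distance_pairs_alt (nums : List Int) (max_distance : Int) : Int :=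
  (List.range nums.length).foldl
    (fun (count : Int) right =>
      let target := nums.getD right 0 - max_distance
      let lo := pvBis nums target 0 right
      count + ((right : Int) - (lo : Int)))
    0

-- ===== PRECONDITION & SPEC =====
-- Pre_ restricts to nondecreasing nums with nonnegative max_distance — the helper's
-- documented domain (it is called on a sorted array in the k-th-smallest-pair-distance
-- solver); outside it the sliding-window invariant does not hold (so A's value on
-- unsorted input cannot be matched by any per-element search) and with negative
-- max_distance A can raise IndexError.
def Pre_count_low_distance_pairs (nums : List Int) (max_distance : Int) : Prop :=
  List.Pairwise (· ≤ ·) nums ∧ 0 ≤ max_distance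
instance (nums : List Int) (max_distance : Int) : Decidable (Pre_count_low_distance_pairs nums max_distance) := by unfold Pre_count_low_distance_pairs; infer_instance

def pvWitness_count_low_distance_pairs : List Int × Int := ([1, 2, 2, 5], 2)

def Spec_count_low_distance_pairs (nums : List Int) (max_distance : Int) (out : Int) : Prop := out = count_low_distance_pairs_alt nums max_distance
instance (nums : List Int) (max_distance : Int) (out : Int) : Decidable (Spec_count_low_distance_pairs nums max_distance out) := by unfold Spec_count_low_distance_pairs; infer_instance

-- ===== CLAIM (what is proved, stated in full; the proofs are below) =====
def Claim_equal_count_low_distance_pairs : Prop := ∀ (nums : List Int) (max_distance : Int), Dom_count_low_distance_pairs nums max_distance → Pre_count_low_distance_pairs nums max_distance → Spec_count_low_distance_pairs nums max_distance (count_low_distance_pairs nums max_distance)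

-- ===== LEMMAS AND PROOFS =====

theorem pv_sorted_getD_mono {nums : List Int} (hs : List.Pairwise (· ≤ ·) nums)
    {i j : Nat} (hij : i ≤ j) (hj : j < nums.length) :
    nums.getD i 0 ≤ nums.getD j 0 := by
  rcases Nat.eq_or_lt_of_le hij with rfl | h
  · exact le_refl _
  · have hi : i < nums.length := lt_trans h hj
    rw [List.getD_eq_getElem _ _ hi, List.getD_eq_getElem _ _ hj]
    exact List.pairwise_iff_getElem.mp hs i j hi hj h

-- bisect_left characterization on a sorted list
theorem pvBis_spec {nums : List Int} (hs : List.Pairwise (· ≤ ·) nums) (t : Int) :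
    ∀ (d lo hi : Nat), hi - lo = d → lo ≤ hi → hi ≤ nums.length →
    lo ≤ pvBis nums t lo hi ∧ pvBis nums t lo hi ≤ hi ∧
    (∀ i, lo ≤ i → i < pvBis nums t lo hi → nums.getD i 0 < t) ∧
    (∀ i, pvBis nums t lo hi ≤ i → i < hi → t ≤ nums.getD i 0) := by
  intro d
  induction d using Nat.strong_induction_on with
  | _ d IH => ?_
  intro lo hi hd hlohi hhi
  rw [pvBis]
  by_cases h : lo < hi
  · simp only [dif_pos h]
    by_cases hc : nums.getD ((lo + hi) / 2) 0 < t
    · simp only [if_pos hc]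
      obtain ⟨h1, h2, h3, h4⟩ :=
        IH (hi - ((lo + hi) / 2 + 1)) (by omega) ((lo + hi) / 2 + 1) hi rfl (by omega) hhi
      refine ⟨by omega, h2, ?_, h4⟩
      intro i hi1 hi2
      by_cases hik : (lo + hi) / 2 + 1 ≤ i
      · exact h3 i hik hi2
      · exact lt_of_le_of_lt (pv_sorted_getD_mono hs (by omega) (by omega)) hc
    · simp only [if_neg hc]
      obtain ⟨h1, h2, h3, h4⟩ :=
        IH ((lo + hi) / 2 - lo) (by omega) lo ((lo + hi) / 2) rfl (by omega) (by omega)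
      refine ⟨h1, by omega, h3, ?_⟩
      intro i hi1 hi2
      by_cases hik : i < (lo + hi) / 2
      · exact h4 i hi1 hik
      · exact le_trans (not_lt.mp hc) (pv_sorted_getD_mono hs (by omega) (by omega))
  · simp only [dif_neg h]
    exact ⟨le_refl _, by omega, fun i h1 h2 => by omega, fun i h1 h2 => by omega⟩

-- while-loop characterization on a sorted list (0 ≤ max_distance makes it stop by index r)
theorem pvAdvA_spec {nums : List Int} {md : Int}
    (hmd : 0 ≤ md) {r : Nat} (hr : r < nums.length) :
    ∀ (d left : Nat), r - left = d → left ≤ r →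
    left ≤ pvAdvA nums md r left ∧ pvAdvA nums md r left ≤ r ∧
    (∀ i, left ≤ i → i < pvAdvA nums md r left → nums.getD i 0 < nums.getD r 0 - md) ∧
    nums.getD r 0 - md ≤ nums.getD (pvAdvA nums md r left) 0 := by
  intro d
  induction d using Nat.strong_induction_on with
  | _ d IH => ?_
  intro left hd hlr
  rw [pvAdvA]
  have hln : left < nums.length := lt_of_le_of_lt hlr hr
  simp only [dif_pos hln]
  by_cases hc : nums.getD r 0 - nums.getD left 0 > md
  · simp only [if_pos hc]
    have hne : left ≠ r := by intro h; subst h; omega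
    obtain ⟨h1, h2, h3, h4⟩ := IH (r - (left + 1)) (by omega) (left + 1) rfl (by omega)
    refine ⟨by omega, h2, ?_, h4⟩
    intro i hi1 hi2
    by_cases hik : left + 1 ≤ i
    · exact h3 i hik hi2
    · have : i = left := by omega
      subst this; omega
  · simp only [if_neg hc]
    exact ⟨le_refl _, hlr, fun i h1 h2 => by omega, by omega⟩

-- the canonical per-element answer: first index with nums[i] ≥ nums[r] - max_distance
-- prev-left step: the while loop, started at any position ≤ the bisect answer, lands on it
theorem pvAdv_eq_bis {nums : List Int} {md : Int} (hs : List.Pairwise (· ≤ ·) nums)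
    (hmd : 0 ≤ md) {r prev : Nat} (hr : r < nums.length)
    (hp : prev ≤ pvBis nums (nums.getD r 0 - md) 0 r) :
    pvAdvA nums md r prev = pvBis nums (nums.getD r 0 - md) 0 r := by
  obtain ⟨b1, b2, b3, b4⟩ :=
    pvBis_spec hs (nums.getD r 0 - md) (r - 0) 0 r rfl (by omega) (le_of_lt hr)
  obtain ⟨a1, a2, a3, a4⟩ := pvAdvA_spec hmd hr (r - prev) prev rfl (le_trans hp b2)
  set q := pvAdvA nums md r prev
  set p := pvBis nums (nums.getD r 0 - md) 0 r
  rcases lt_trichotomy q p with h | h | h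
  · have h5 := b3 q (by omega) h
    omega
  · exact h
  · have h5 := b4 p (le_refl _) (by omega)
    have h6 := a3 p hp h
    omega

-- the bisect answers are monotone in r on a sorted list
theorem pvBis_mono {nums : List Int} {md : Int} (hs : List.Pairwise (· ≤ ·) nums)
    {k : Nat} (hk : k + 1 < nums.length) :
    pvBis nums (nums.getD k 0 - md) 0 k ≤
      pvBis nums (nums.getD (k + 1) 0 - md) 0 (k + 1) := by
  obtain ⟨b1, b2, b3, b4⟩ :=
    pvBis_spec hs (nums.getD k 0 - md) (k - 0) 0 k rfl (by omega) (by omega)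
  obtain ⟨c1, c2, c3, c4⟩ :=
    pvBis_spec hs (nums.getD (k + 1) 0 - md) (k + 1 - 0) 0 (k + 1) rfl (by omega) (by omega)
  set q := pvBis nums (nums.getD k 0 - md) 0 k
  set p := pvBis nums (nums.getD (k + 1) 0 - md) 0 (k + 1)
  rcases Nat.lt_or_ge p q with hlt | h
  · exfalso
    have h5 := b3 p (by omega) (by omega)
    have h6 := c4 p (le_refl _) (by omega)
    have h7 := pv_sorted_getD_mono hs (show k ≤ k + 1 by omega) hk
    omega
  · exact h

-- the previous-left value carried by A's fold, expressed without the fold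
def pvL (nums : List Int) (md : Int) : Nat → Nat
  | 0 => 0
  | k + 1 => pvBis nums (nums.getD k 0 - md) 0 k

theorem pvL_le {nums : List Int} {md : Int} (hs : List.Pairwise (· ≤ ·) nums)
    {k : Nat} (hk : k < nums.length) :
    pvL nums md k ≤ pvBis nums (nums.getD k 0 - md) 0 k := by
  cases k with
  | zero => exact Nat.zero_le _
  | succ k => exact pvBis_mono hs hk

theorem pv_fold_eq (nums : List Int) (md : Int)
    (hs : List.Pairwise (· ≤ ·) nums) (hmd : 0 ≤ md) :
    ∀ k, k ≤ nums.length →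
    (List.range k).foldl
      (fun (st : Nat × Int) right =>
        let left := pvAdvA nums md right st.1
        (left, st.2 + ((right : Int) - (left : Int)))) (0, 0)
    = (pvL nums md k,
       (List.range k).foldl
        (fun (count : Int) right =>
          let target := nums.getD right 0 - md
          let lo := pvBis nums target 0 right
          count + ((right : Int) - (lo : Int))) 0) := by
  intro k
  induction k with
  | zero => intro _; rfl
  | succ k IH =>
    intro hk
    rw [List.range_succ, List.foldl_append, List.foldl_append, IH (by omega)]
    simp only [List.foldl_cons, List.foldl_nil]
    have heq : pvAdvA nums md k (pvL nums md k) = pvBis nums (nums.getD k 0 - md) 0 k :=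
      pvAdv_eq_bis hs hmd (by omega) (pvL_le hs (by omega))
    rw [heq]
    rfl

-- ===== VERDICT (by name: the statement is the Claim_ definition above) =====
theorem count_low_distance_pairs_spec : Claim_equal_count_low_distance_pairs := by
  intro nums md _ hpre
  unfold Spec_count_low_distance_pairs count_low_distance_pairs count_low_distance_pairs_alt
  exact congrArg Prod.snd (pv_fold_eq nums md hpre.1 hpre.2 nums.length (le_refl _))
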